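-- pv_equiv track=rewrite | github.com/yesitsfebreeze/.files | wezterm/finder_tui.py | get_unique_prefixes
-- ===== SOURCE A (Python) =====
-- def get_unique_prefixes(names):
--     """Compute unique prefix lengths for each picker name."""
--     prefixes = {}
--     for i, name in enumerate(names):
--         length = 1
--         while length <= len(name):
--             prefix = name[:length].lower()
--             unique = True
--             for j, other in enumerate(names):
--                 if i != j and other[:length].lower() == prefix:
--                     unique = False
--                     break
--             if unique:
--                 break
--             length += 1
--         prefixes[name] = length
--     return prefixes
-- ===== SOURCE B (Python) =====
-- def get_unique_prefixes(names):
--     """Compute unique prefix lengths for each picker name."""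
--     # Count, over all names, every lowercased prefix once per name.
--     counts = {}
--     for name in names:
--         low = name.lower()
--         for l in range(1, len(low) + 1):
--             p = low[:l]
--             counts[p] = counts.get(p, 0) + 1
--     # A prefix is unique for a name iff exactly one name carries it.
--     prefixes = {}
--     for name in names:
--         low = name.lower()
--         length = len(name) + 1
--         for l in range(1, len(low) + 1):
--             if counts[low[:l]] == 1:
--                 length = l
--                 break
--         prefixes[name] = length
--     return prefixes
-- ===== Notes on version B (the rewrite author's own statement) =====
-- stated objective: faster
-- what changed: Replaces the per-name inner scan over all other names with a single pass that counts every lowercased prefix in a dictionary, then reads each name's first prefix with count 1.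
import Mathlib
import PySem

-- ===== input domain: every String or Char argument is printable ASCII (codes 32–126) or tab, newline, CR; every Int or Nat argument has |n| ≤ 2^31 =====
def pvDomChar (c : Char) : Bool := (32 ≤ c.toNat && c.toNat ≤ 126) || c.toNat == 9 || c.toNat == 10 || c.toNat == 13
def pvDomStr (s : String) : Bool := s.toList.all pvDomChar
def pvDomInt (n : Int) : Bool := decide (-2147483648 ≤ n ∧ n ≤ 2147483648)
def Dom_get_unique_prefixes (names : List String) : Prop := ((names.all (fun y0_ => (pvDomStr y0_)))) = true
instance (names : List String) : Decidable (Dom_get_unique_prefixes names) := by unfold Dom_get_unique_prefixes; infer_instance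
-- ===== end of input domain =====

-- B replaces A's quadratic scan over the other names with one dictionary counting every
-- lowercased prefix, then reads off each name's first prefix carried by exactly one name.

-- ===== PORT A =====

-- name[:l].lower()
def pvPrefA (s : List Char) (l : Int) : List Char :=
  PySem.Chars.lower (PySem.List.slice s none (some l))

-- the inner 'for j, other in enumerate(names)' scan: True iff no other name shares the prefix
def pvUniqueA (names : List String) (i : Int) (l : Int) (pref : List Char) : Bool :=
  (PySem.List.enumerate names).all (fun jo => !(decide (i ≠ jo.1) && (pvPrefA jo.2.toList l == pref)))

-- the 'while length <= len(name)' loop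
def pvWhileA (names : List String) (i : Int) (name : List Char) (l : Nat) : Nat :=
  if l ≤ name.length then
    if pvUniqueA names i (l : Int) (pvPrefA name (l : Int)) then l
    else pvWhileA names i name (l + 1)
  else l
termination_by name.length + 1 - l

def get_unique_prefixes (names : List String) : List (String × Int) :=
  ((PySem.List.enumerate names).foldl
    (fun d jo => d.insert jo.2 ((pvWhileA names jo.1 jo.2.toList 1 : Nat) : Int))
    PySem.Dict.empty).items

-- ===== PORT B =====

-- low[:l]
def pvLowPref (low : List Char) (l : Int) : List Char := PySem.List.slice low none (some l)

-- counts[p] = counts.get(p, 0) + 1 over every lowercased prefix of every name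
def pvCountsB (names : List String) : PySem.Dict (List Char) Int :=
  names.foldl (fun d name =>
    let low := PySem.Chars.lower name.toList
    (PySem.List.pyRange 1 (low.length + 1)).foldl
      (fun d l => d.insert (pvLowPref low l) (d.getD (pvLowPref low l) 0 + 1)) d)
    PySem.Dict.empty

-- the 'for l in range(1, len(low)+1): if counts[low[:l]] == 1: break' loop
def pvScanB (counts : PySem.Dict (List Char) Int) (low : List Char) : List Int → Int → Int
  | [], dflt => dflt
  | l :: rest, dflt =>
      if counts.getD (pvLowPref low l) 0 == 1 then l else pvScanB counts low rest dflt

def get_unique_prefixes_alt (names : List String) : List (String × Int) :=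
  let counts := pvCountsB names
  (names.foldl (fun d name =>
    let low := PySem.Chars.lower name.toList
    d.insert name (pvScanB counts low (PySem.List.pyRange 1 (low.length + 1))
      ((name.toList.length : Int) + 1)))
    PySem.Dict.empty).items

-- ===== PRECONDITION & SPEC =====
def Spec_get_unique_prefixes (names : List String) (out : List (String × Int)) : Prop := out = get_unique_prefixes_alt names
instance (names : List String) (out : List (String × Int)) : Decidable (Spec_get_unique_prefixes names out) := by unfold Spec_get_unique_prefixes; infer_instance

-- ===== CLAIM (what is proved, stated in full; the proofs are below) =====
def Claim_equal_get_unique_prefixes : Prop := ∀ (names : List String), Dom_get_unique_prefixes names → Spec_get_unique_prefixes names (get_unique_prefixes names)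

-- ===== LEMMAS AND PROOFS =====

-- the per-name list of lowercased prefixes B counts
def pvPrefList (name : String) : List (List Char) :=
  (PySem.List.pyRange 1 ((PySem.Chars.lower name.toList).length + 1)).map
    (fun l => pvLowPref (PySem.Chars.lower name.toList) l)

theorem pvLowPref_natCast (low : List Char) (l : Nat) :
    pvLowPref low (l : Int) = low.take l := by
  simp [pvLowPref, PySem.List.slice_to low (by positivity : (0:Int) ≤ (l:Int))]

theorem pvPrefA_natCast (s : List Char) (l : Nat) :
    pvPrefA s (l : Int) = (PySem.Chars.lower s).take l := by
  simp only [pvPrefA, PySem.List.slice_to s (by positivity : (0:Int) ≤ (l:Int)), Int.toNat_natCast]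
  show List.map PySem.Chars.lowerChar (List.take l s) = _
  simp [PySem.Chars.lower, List.map_take]

theorem pvCounts_fold (names : List String) (d : PySem.Dict (List Char) Int) (p : List Char) :
    ((names.foldl (fun d name =>
      let low := PySem.Chars.lower name.toList
      (PySem.List.pyRange 1 (low.length + 1)).foldl
        (fun d l => d.insert (pvLowPref low l) (d.getD (pvLowPref low l) 0 + 1)) d) d).getD p 0)
    = d.getD p 0 + ((names.flatMap pvPrefList).count p : Int) := by
  induction names generalizing d with
  | nil => simp
  | cons n ns ih =>
      simp only [List.foldl_cons, List.flatMap_cons, List.count_append, ih]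
      have h := List.foldl_map (f := fun l => pvLowPref (PySem.Chars.lower n.toList) l)
        (g := fun (d : PySem.Dict (List Char) Int) x => d.insert x (d.getD x 0 + 1))
        (l := PySem.List.pyRange 1 ((PySem.Chars.lower n.toList).length + 1)) (init := d)
      simp only [← h, PySem.Dict.getD_foldl_insert_add_one]
      show d.getD p 0 + ((pvPrefList n).count p : Int) + _ = _
      push_cast
      ring

theorem pvCounts_getD (names : List String) (p : List Char) :
    (pvCountsB names).getD p 0 = ((names.flatMap pvPrefList).count p : Int) := by
  rw [pvCountsB, pvCounts_fold]
  simp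

-- count of a length-l prefix inside one name's prefix list
theorem pvPrefList_count (name : String) (l : Nat) (hl : 1 ≤ l) (p : List Char)
    (hp : p.length = l) :
    (pvPrefList name).count p = if (PySem.Chars.lower name.toList).take l = p then 1 else 0 := by
  set low := PySem.Chars.lower name.toList with hlow
  rw [pvPrefList, List.count_eq_countP, List.countP_map]
  have hpred : ∀ x ∈ PySem.List.pyRange 1 ((low.length : Int) + 1),
      (((fun x => x == p) ∘ fun l => pvLowPref low l) x = true
        ↔ ((x == (l : Int)) && decide (low.take l = p)) = true) := by
    intro x hx
    rw [PySem.List.mem_pyRange_one] at hx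
    obtain ⟨k, rfl⟩ : ∃ k : Nat, x = (k : Nat) := ⟨x.toNat, by omega⟩
    have hk : k ≤ low.length := by exact_mod_cast (by omega : (k:Int) ≤ (low.length:Int))
    simp only [Function.comp, pvLowPref_natCast, beq_iff_eq,
      Bool.and_eq_true, decide_eq_true_eq, Nat.cast_inj]
    constructor
    · intro h
      have hlk : p.length = k := by rw [← h, List.length_take]; omega
      have hkl : k = l := by omega
      subst hkl
      exact ⟨by exact_mod_cast rfl, h⟩
    · rintro ⟨h1, h2⟩
      have : k = l := by exact_mod_cast h1
      subst this
      exact h2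
  rw [List.countP_congr hpred]
  by_cases hcond : low.take l = p
  · simp only [hcond, decide_true, Bool.and_true, if_pos]
    rw [← List.count_eq_countP]
    exact List.count_eq_one_of_mem (PySem.List.nodup_pyRange_one 1 _)
      (by rw [PySem.List.mem_pyRange_one]
          have hle : l ≤ low.length := by
            have := congrArg List.length hcond
            simp [List.length_take] at this
            omega
          omega)
  · simp [hcond]

theorem pvFlat_count (names : List String) (l : Nat) (hl : 1 ≤ l) (p : List Char)
    (hp : p.length = l) :
    (names.flatMap pvPrefList).count p
      = names.countP (fun n => (PySem.Chars.lower n.toList).take l == p) := by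
  induction names with
  | nil => simp
  | cons n ns ih =>
      rw [List.flatMap_cons, List.count_append, ih, List.countP_cons,
        pvPrefList_count n l hl p hp]
      by_cases h : (PySem.Chars.lower n.toList).take l = p
      · simp [h]
        omega
      · simp [h]

theorem pvFilter_singleton {E : List (Int × String)} {g : String → Bool} {i : Int} {name : String}
    (hpw : E.Pairwise (fun p q => p.1 < q.1)) (hmem : (i, name) ∈ E) (hg : g name = true) :
    (∀ jo ∈ E, g jo.2 = true → jo.1 = i) ↔ E.countP (fun jo => g jo.2) = 1 := by
  rw [List.countP_eq_length_filter]
  have hF : (i, name) ∈ E.filter (fun jo => g jo.2) := List.mem_filter.2 ⟨hmem, hg⟩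
  have hpwF : (E.filter (fun jo => g jo.2)).Pairwise (fun p q => p.1 < q.1) := hpw.filter _
  have hsub : ∀ jo, jo ∈ E.filter (fun jo => g jo.2) ↔ jo ∈ E ∧ g jo.2 = true := by
    intro jo; exact List.mem_filter
  constructor
  · intro hall
    have hpos : 0 < (E.filter (fun jo => g jo.2)).length := List.length_pos_of_mem hF
    have hle : (E.filter (fun jo => g jo.2)).length ≤ 1 := by
      by_contra hgt
      have h0 : 0 < (E.filter (fun jo => g jo.2)).length := by omega
      have h1 : 1 < (E.filter (fun jo => g jo.2)).length := by omega
      have hlt := (List.pairwise_iff_getElem.1 hpwF) 0 1 h0 h1 (by omega)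
      have ha := (hsub _).1 (List.getElem_mem h0)
      have hb := (hsub _).1 (List.getElem_mem h1)
      have := hall _ ha.1 ha.2
      have := hall _ hb.1 hb.2
      omega
    omega
  · intro hlen jo hjo hgjo
    obtain ⟨x, hx⟩ := List.length_eq_one_iff.1 hlen
    have h1 : (i, name) = x := by rw [hx] at hF; simpa using hF
    have h2 : jo = x := by
      have : jo ∈ E.filter (fun jo => g jo.2) := (hsub jo).2 ⟨hjo, hgjo⟩
      rw [hx] at this; simpa using this
    rw [h2, ← h1]

theorem pvUnique_iff (names : List String) (i : Int) (name : String) (l : Nat)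
    (hmem : (i, name) ∈ PySem.List.enumerate names) :
    (pvUniqueA names i (l : Int) (pvPrefA name.toList (l : Int)) = true ↔
      names.countP (fun n =>
        (PySem.Chars.lower n.toList).take l == (PySem.Chars.lower name.toList).take l) = 1) := by
  set pref := (PySem.Chars.lower name.toList).take l with hpref
  set g : String → Bool := fun n => (PySem.Chars.lower n.toList).take l == pref with hg
  have hcount : names.countP g = (PySem.List.enumerate names).countP (fun jo => g jo.2) := by
    conv_lhs => rw [← PySem.List.map_snd_enumerate names 0]
    rw [List.countP_map]
    rfl
  rw [hcount]
  rw [← pvFilter_singleton (PySem.List.pairwise_lt_enumerate names 0) hmem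
    (by rw [hg]; exact beq_self_eq_true pref ▸ (by simp [hpref]))]
  rw [pvUniqueA, List.all_eq_true]
  constructor
  · intro h jo hjo hgjo
    have := h jo hjo
    simp only [pvPrefA_natCast, Bool.not_eq_true', Bool.and_eq_false_iff] at this
    rcases this with h1 | h2
    · have : ¬ i ≠ jo.1 := by simpa using h1
      omega
    · rw [hg] at hgjo; simp only [beq_iff_eq] at hgjo
      rw [hgjo] at h2; simp [hpref] at h2
  · intro h jo hjo
    simp only [pvPrefA_natCast, Bool.not_eq_true', Bool.and_eq_false_iff]
    by_cases hgjo : g jo.2 = true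
    · left
      have := h jo hjo hgjo
      simp [this]
    · right
      rw [hg] at hgjo
      simpa [hpref] using hgjo
theorem pvLower_length (s : List Char) : (PySem.Chars.lower s).length = s.length := by
  show (List.map PySem.Chars.lowerChar s).length = s.length
  simp

theorem pvCond_iff (names : List String) (i : Int) (name : String) (l : Nat)
    (hmem : (i, name) ∈ PySem.List.enumerate names)
    (hl : 1 ≤ l) (hle : l ≤ name.toList.length) :
    (pvUniqueA names i (l : Int) (pvPrefA name.toList (l : Int)) = true ↔
      ((pvCountsB names).getD (pvLowPref (PySem.Chars.lower name.toList) (l : Int)) 0 == 1) = true) := by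
  set low := PySem.Chars.lower name.toList with hlow
  have hlen : (low.take l).length = l := by
    rw [List.length_take, hlow, pvLower_length]; omega
  rw [pvLowPref_natCast, pvCounts_getD, pvFlat_count names l hl _ hlen]
  rw [pvUnique_iff names i name l hmem]
  have hcast : ∀ n : Nat, (((n : Int) == 1) = true ↔ n = 1) := by intro n; simp
  rw [hcast]

theorem pvLoop_eq (names : List String) (i : Int) (name : String)
    (hmem : (i, name) ∈ PySem.List.enumerate names) :
    ∀ l : Nat, 1 ≤ l → l ≤ name.toList.length + 1 →
      ((pvWhileA names i name.toList l : Nat) : Int)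
        = pvScanB (pvCountsB names) (PySem.Chars.lower name.toList)
            (PySem.List.pyRange (l : Int) ((name.toList.length : Int) + 1))
            ((name.toList.length : Int) + 1) := by
  have main : ∀ fuel l, 1 ≤ l → l ≤ name.toList.length + 1 →
      name.toList.length + 1 - l ≤ fuel →
      ((pvWhileA names i name.toList l : Nat) : Int)
        = pvScanB (pvCountsB names) (PySem.Chars.lower name.toList)
            (PySem.List.pyRange (l : Int) ((name.toList.length : Int) + 1))
            ((name.toList.length : Int) + 1) := by
    intro fuel
    induction fuel with
    | zero =>
        intro l h1 h2 h0
        have hl : l = name.toList.length + 1 := by omega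
        rw [pvWhileA]
        rw [if_neg (by omega)]
        rw [PySem.List.pyRange_one_eq_nil (by exact_mod_cast (by omega : ((name.toList.length : Int) + 1) ≤ (l : Int)))]
        rw [pvScanB]
        push_cast [hl]
        ring
    | succ fuel ih =>
        intro l h1 h2 h0
        by_cases hle : l ≤ name.toList.length
        · rw [pvWhileA, if_pos hle]
          rw [PySem.List.pyRange_one_cons (by exact_mod_cast (by omega : (l : Int) < (name.toList.length : Int) + 1))]
          rw [pvScanB]
          by_cases hu : pvUniqueA names i (l : Int) (pvPrefA name.toList (l : Int)) = true
          · rw [if_pos hu, if_pos ((pvCond_iff names i name l hmem h1 hle).1 hu)]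
          · rw [if_neg hu, if_neg (fun hc => hu ((pvCond_iff names i name l hmem h1 hle).2 hc))]
            have hrec := ih (l + 1) (by omega) (by omega) (by omega)
            push_cast at hrec
            exact hrec
        · have hl : l = name.toList.length + 1 := by omega
          rw [pvWhileA, if_neg (by omega)]
          rw [PySem.List.pyRange_one_eq_nil (by exact_mod_cast (by omega : ((name.toList.length : Int) + 1) ≤ (l : Int)))]
          rw [pvScanB]
          push_cast [hl]
          ring
  intro l h1 h2
  exact main (name.toList.length + 1 - l) l h1 h2 le_rfl

-- ===== VERDICT (by name: the statement is the Claim_ definition above) =====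
theorem get_unique_prefixes_spec : Claim_equal_get_unique_prefixes := by
  intro names _
  show get_unique_prefixes names = get_unique_prefixes_alt names
  rw [get_unique_prefixes, get_unique_prefixes_alt]
  congr 1
  rw [PySem.List.foldl_congr_mem _ _
    (fun d (jo : Int × String) => d.insert jo.2
      (pvScanB (pvCountsB names) (PySem.Chars.lower jo.2.toList)
        (PySem.List.pyRange 1 ((jo.2.toList.length : Int) + 1))
        ((jo.2.toList.length : Int) + 1)))
    PySem.Dict.empty
    (by
      intro acc jo hjo
      have hjo2 : (jo.1, jo.2) ∈ PySem.List.enumerate names := by simpa using hjo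
      rw [pvLoop_eq names jo.1 jo.2 hjo2 1 le_rfl (by omega)]
      norm_num)]
  set cnt := pvCountsB names with hcnt
  conv_rhs => rw [← PySem.List.map_snd_enumerate names 0, List.foldl_map]
  apply PySem.List.foldl_congr_mem
  intro acc jo hjo
  simp only [pvLower_length]
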